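-- pv_equiv track=rewrite | github.com/mayank905/Geek4geek | Geek hates too many 1s.py | noConseBits
-- ===== SOURCE A (Python) =====
-- def noConseBits(n: int) -> int:
--     # code here
--     binary = bin(n)
--     binary = binary[2:]
--     str1=''
--     count = 0
--     for i, bit in enumerate(binary):
--         if bit == '1':
--             count += 1
--             if count == 3:
--                 str1 += '0'
--                 count = 0
--             else:
--                 str1+='1'
--         else:
--             count=0
--             str1+='0'
--     return int(str1, 2)
-- ===== SOURCE B (Python) =====
-- def noConseBits(n: int) -> int:
--     s = bin(n)[2:]
--     out = []
--     i = 0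
--     while i < len(s):
--         if s[i] == '1':
--             j = i
--             while j < len(s) and s[j] == '1':
--                 j += 1
--             run_len = j - i
--             out.append(''.join('0' if (k + 1) % 3 == 0 else '1' for k in range(run_len)))
--             i = j
--         else:
--             out.append('0')
--             i += 1
--     return int(''.join(out), 2)
-- ===== Notes on version B (the rewrite author's own statement) =====
-- stated objective: alternative
-- what changed: B segments the binary string into maximal runs of '1' bits and emits a whole per-run pattern (zeroing every third position of the run) at once, instead of A's flat per-character loop threading a consecutive-1 counter.
import Mathlib
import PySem

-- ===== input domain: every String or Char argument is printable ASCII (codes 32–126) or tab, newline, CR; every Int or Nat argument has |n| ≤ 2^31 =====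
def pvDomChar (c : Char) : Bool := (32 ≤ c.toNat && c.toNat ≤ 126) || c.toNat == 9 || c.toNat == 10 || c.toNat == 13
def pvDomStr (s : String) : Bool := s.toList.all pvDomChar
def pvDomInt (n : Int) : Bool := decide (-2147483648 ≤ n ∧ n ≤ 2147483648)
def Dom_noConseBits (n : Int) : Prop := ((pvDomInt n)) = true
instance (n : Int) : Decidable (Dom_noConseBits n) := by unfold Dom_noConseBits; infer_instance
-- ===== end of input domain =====

-- B groups the binary string into maximal runs of '1' and emits a per-run pattern, instead of
-- A's flat per-character loop with a consecutive-1 counter; same cost, different decomposition.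

-- ===== PORT A =====

-- bin(m) digits for a natural m > 0, most significant first (hand port of bin; exact for Nat)
def pyBitsAux (m : Nat) : List Char :=
  if h : m = 0 then [] else pyBitsAux (m / 2) ++ [if m % 2 = 1 then '1' else '0']
decreasing_by exact Nat.div_lt_self (Nat.pos_of_ne_zero h) (by decide)

-- bin(n)[2:] as a char list: for n < 0 Python gives '-0b…' so char 'b' survives the [2:] slice
def pyBinDrop2 (n : Int) : List Char :=
  let body := if n.natAbs = 0 then ['0'] else pyBitsAux n.natAbs
  if n < 0 then 'b' :: body else body

-- int(s, 2) on a nonempty string of '0'/'1' chars (hand port, exact on that domain)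
def pyIntBase2 (s : List Char) : Int :=
  s.foldl (fun a c => 2 * a + (if c = '1' then 1 else 0)) 0

-- A's for-loop over (bit, count) state, emitting output chars in order
def noConseBitsGo : List Char → Nat → List Char
  | [], _ => []
  | b :: t, count =>
    if b = '1' then
      if count + 1 = 3 then '0' :: noConseBitsGo t 0
      else '1' :: noConseBitsGo t (count + 1)
    else '0' :: noConseBitsGo t 0

def noConseBits (n : Int) : Int :=
  pyIntBase2 (noConseBitsGo (pyBinDrop2 n) 0)

-- ===== PORT B =====

-- ''.join('0' if (k+1)%3==0 else '1' for k in range(L))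
def patRun (L : Nat) : List Char :=
  (List.range L).map (fun k => if (k + 1) % 3 = 0 then '0' else '1')

-- B's outer while-loop: consume a maximal run of '1's (the inner while = takeWhile/dropWhile) or one other char
def altGo : List Char → List Char
  | [] => []
  | c :: t =>
    if h : c = '1' then
      patRun ((c :: t).takeWhile (fun x => x == '1')).length ++
        altGo ((c :: t).dropWhile (fun x => x == '1'))
    else '0' :: altGo t
termination_by s => s.length
decreasing_by
  · simp only [List.dropWhile_cons, h]
    simp only [beq_self_eq_true, if_true]
    exact Nat.lt_succ_of_le (List.length_dropWhile_le _ _)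
  · simp

def noConseBits_alt (n : Int) : Int :=
  pyIntBase2 (altGo (pyBinDrop2 n))

-- ===== PRECONDITION & SPEC =====
def Spec_noConseBits (n : Int) (out : Int) : Prop := out = noConseBits_alt n
instance (n : Int) (out : Int) : Decidable (Spec_noConseBits n out) := by unfold Spec_noConseBits; infer_instance

-- ===== CLAIM (what is proved, stated in full; the proofs are below) =====
def Claim_equal_noConseBits : Prop := ∀ (n : Int), Dom_noConseBits n → Spec_noConseBits n (noConseBits n)

-- ===== LEMMAS AND PROOFS =====

-- the pattern A's counter produces across a run of ones, started at counter value c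
def cyc (c k : Nat) : List Char :=
  (List.range k).map (fun j => if (c + j + 1) % 3 = 0 then '0' else '1')

lemma cyc_succ (c k : Nat) :
    cyc c (k + 1) = (if (c + 1) % 3 = 0 then '0' else '1') :: cyc ((c + 1) % 3) k := by
  simp only [cyc, List.range_succ_eq_map, List.map_cons, List.map_map]
  refine (List.cons_eq_cons).mpr ⟨by norm_num, ?_⟩
  refine List.map_congr_left ?_
  intro j _
  simp only [Function.comp_apply]
  have h : (c + (j + 1) + 1) % 3 = ((c + 1) % 3 + j + 1) % 3 := by omega
  rw [h]

lemma patRun_eq_cyc (k : Nat) : patRun k = cyc 0 k := by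
  simp [patRun, cyc]

lemma go_ones (k : Nat) : ∀ (c : Nat) (rest : List Char), c < 3 →
    noConseBitsGo (List.replicate k '1' ++ rest) c
      = cyc c k ++ noConseBitsGo rest ((c + k) % 3) := by
  induction k with
  | zero =>
    intro c rest hc
    simp [cyc, Nat.mod_eq_of_lt hc]
  | succ k ih =>
    intro c rest hc
    rw [List.replicate_succ, List.cons_append]
    rw [cyc_succ]
    by_cases h3 : c + 1 = 3
    · have h0 : (c + 1) % 3 = 0 := by omega
      have hk : (c + (k + 1)) % 3 = (0 + k) % 3 := by omega
      simp only [noConseBitsGo, if_pos rfl, if_pos h3, h0, if_pos rfl, hk]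
      rw [ih 0 rest (by omega)]
      simp
    · have h0 : (c + 1) % 3 = c + 1 := by omega
      have hne : ¬ (c + 1) % 3 = 0 := by omega
      have hk : (c + (k + 1)) % 3 = (c + 1 + k) % 3 := by omega
      simp only [noConseBitsGo, if_pos rfl, if_neg h3, h0, if_neg hne, hk]
      rw [ih (c + 1) rest (by omega)]
      simp

lemma go_reset (rest : List Char) (c : Nat)
    (h : rest = [] ∨ ∃ d t, rest = d :: t ∧ d ≠ '1') :
    noConseBitsGo rest c = noConseBitsGo rest 0 := by
  rcases h with h | ⟨d, t, rfl, hd⟩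
  · subst h; rfl
  · simp [noConseBitsGo, hd]

lemma dropWhile_head_not (l : List Char) :
    l.dropWhile (fun x => x == '1') = [] ∨
      ∃ d t, l.dropWhile (fun x => x == '1') = d :: t ∧ d ≠ '1' := by
  induction l with
  | nil => left; rfl
  | cons c t ih =>
    by_cases hc : c = '1'
    · simpa [List.dropWhile_cons, hc] using ih
    · right; exact ⟨c, t, by simp [List.dropWhile_cons, hc], hc⟩

lemma takeWhile_ones (l : List Char) :
    l.takeWhile (fun x => x == '1')
      = List.replicate (l.takeWhile (fun x => x == '1')).length '1' := by
  refine List.eq_replicate_iff.mpr ⟨rfl, ?_⟩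
  intro b hb
  have := List.mem_takeWhile_imp hb
  simpa using this

lemma altGo_nil : altGo [] = [] := by rw [altGo.eq_def]

lemma altGo_cons (c : Char) (t : List Char) :
    altGo (c :: t) = if h : c = '1' then
      patRun ((c :: t).takeWhile (fun x => x == '1')).length ++
        altGo ((c :: t).dropWhile (fun x => x == '1'))
    else '0' :: altGo t := by rw [altGo.eq_def]

lemma go_eq_altGo : ∀ (N : Nat) (s : List Char), s.length ≤ N →
    noConseBitsGo s 0 = altGo s := by
  intro N
  induction N with
  | zero =>
    intro s hs
    have : s = [] := List.eq_nil_of_length_eq_zero (Nat.le_zero.mp hs)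
    subst this; rw [altGo_nil]; rfl
  | succ N ih =>
    intro s hs
    match s with
    | [] => rw [altGo_nil]; rfl
    | c :: t =>
      by_cases h : c = '1'
      · set k := ((c :: t).takeWhile (fun x => x == '1')).length with hk
        set rest := (c :: t).dropWhile (fun x => x == '1') with hrest
        have hsplit : c :: t = List.replicate k '1' ++ rest := by
          conv_lhs => rw [← List.takeWhile_append_dropWhile (p := fun x => x == '1') (l := c :: t)]
          rw [← hrest, hk, takeWhile_ones]
          simp
        have hk1 : 1 ≤ k := by
          rw [hk]
          simp [h]
        have hlen : k + rest.length = t.length + 1 := by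
          have := congrArg List.length hsplit
          simpa using this.symm
        have hrlen : rest.length ≤ N := by
          simp at hs; omega
        have hL : noConseBitsGo (c :: t) 0 = cyc 0 k ++ altGo rest := by
          rw [hsplit, go_ones k 0 rest (by omega)]
          rw [go_reset rest _ (dropWhile_head_not _)]
          rw [ih rest hrlen]
        have hR : altGo (c :: t) = patRun k ++ altGo rest := by
          rw [altGo_cons, dif_pos h, ← hk, ← hrest]
        rw [hL, hR, patRun_eq_cyc]
      · rw [altGo_cons, dif_neg h]
        simp only [noConseBitsGo, if_neg h]
        have : t.length ≤ N := by simp at hs; omega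
        rw [ih t this]

-- ===== VERDICT (by name: the statement is the Claim_ definition above) =====
theorem noConseBits_spec : Claim_equal_noConseBits := by
  intro n _
  unfold Spec_noConseBits noConseBits noConseBits_alt
  rw [go_eq_altGo (pyBinDrop2 n).length _ (le_refl _)]
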